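-- pv_equiv track=rewrite | github.com/XReveranX/XRevLab7 | raschet.py | raschet_rec
-- ===== SOURCE A (Python) =====
-- def raschet_rec(k):  #k - кол-во повторений
--     ak=1
--     bk=1
--     if k == 1:
--         ak1=2*(bk)+(ak)
--         bk1=2*(ak)+(bk)
--         return (ak1, bk1)
--     else:
--         buf=raschet_rec(k-1)
--         ak=buf[0]
--         bk=buf[1]
--         ak1=2*(bk)+(ak)
--         bk1=2*(ak)+(bk)
--         return (ak1, bk1)
-- ===== SOURCE B (Python) =====
-- def raschet_rec(k):  #k - кол-во повторений
--     # (a,b)=(1,1); step (a,b) -> (2b+a, 2a+b) keeps a=b, multiplying by 3.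
--     # So after k steps both components equal 3**k (fast exponentiation).
--     n = 3 ** k
--     return (n, n)
-- ===== Notes on version B (the rewrite author's own statement) =====
-- stated objective: faster
-- what changed: Replaced the depth-k recursion by the closed form (3**k, 3**k) via built-in fast exponentiation; intended as faster (O(log k) vs O(k)), measured several-fold at the largest size A still finishes (A raises RecursionError beyond the interpreter recursion limit).
-- outside the precondition, e.g. on raschet_rec(0): A raises RecursionError, B returns (1, 1)
import Mathlib
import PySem

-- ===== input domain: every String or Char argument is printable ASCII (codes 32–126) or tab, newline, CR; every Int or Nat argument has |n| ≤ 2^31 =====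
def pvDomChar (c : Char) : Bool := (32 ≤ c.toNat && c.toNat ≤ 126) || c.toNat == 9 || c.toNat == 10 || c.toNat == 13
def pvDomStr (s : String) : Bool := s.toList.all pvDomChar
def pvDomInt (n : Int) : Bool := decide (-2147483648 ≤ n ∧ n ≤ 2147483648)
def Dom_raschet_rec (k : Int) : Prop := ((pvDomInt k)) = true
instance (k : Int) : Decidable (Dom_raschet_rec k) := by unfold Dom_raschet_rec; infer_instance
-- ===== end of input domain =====

-- B replaces A's depth-k recursion by the closed form (3**k, 3**k) via fast exponentiation (objective: faster).
-- ===== PORT A =====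
-- A recurses on k-1 with base case k == 1; ported by structural recursion on k.toNat
-- (for k <= 0 the Python recursion never terminates, excluded by Pre_; the Nat-0 branch is unreachable there).
def raschetRecAux : Nat -> List Int
  | 0 => []
  | 1 =>
    let ak : Int := 1
    let bk : Int := 1
    [2*bk + ak, 2*ak + bk]
  | n+2 =>
    let buf := raschetRecAux (n+1)
    let ak := (PySem.List.pyGet? buf 0).getD 0
    let bk := (PySem.List.pyGet? buf 1).getD 0
    [2*bk + ak, 2*ak + bk]

def raschet_rec (k : Int) : List Int := raschetRecAux k.toNat

-- ===== PORT B =====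
def raschet_rec_alt (k : Int) : List Int :=
  let n : Int := 3 ^ k.toNat
  [n, n]

-- ===== PRECONDITION & SPEC =====
-- Pre_ excludes k <= 0, on which A never reaches its base case and raises RecursionError.
def Pre_raschet_rec (k : Int) : Prop := 1 <= k
instance (k : Int) : Decidable (Pre_raschet_rec k) := by unfold Pre_raschet_rec; infer_instance
def pvWitness_raschet_rec : Int := (3)
def Spec_raschet_rec (k : Int) (out : List Int) : Prop := out = raschet_rec_alt k
instance (k : Int) (out : List Int) : Decidable (Spec_raschet_rec k out) := by unfold Spec_raschet_rec; infer_instance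

-- ===== CLAIM (what is proved, stated in full; the proofs are below) =====
def Claim_equal_raschet_rec : Prop := ∀ (k : Int), Dom_raschet_rec k → Pre_raschet_rec k → Spec_raschet_rec k (raschet_rec k)

-- ===== LEMMAS AND PROOFS =====
theorem raschetRecAux_eq (n : Nat) : raschetRecAux (n+1) = [3 ^ (n+1), 3 ^ (n+1)] := by
  induction n with
  | zero => decide
  | succ m ih =>
    show raschetRecAux (m+2) = _
    simp [raschetRecAux, ih, PySem.List.pyGet?, PySem.List.pyIdx?]
    ring_nf

-- ===== VERDICT (by name: the statement is the Claim_ definition above) =====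
theorem raschet_rec_spec : Claim_equal_raschet_rec := by
  intro k _ hk
  replace hk : (1:Int) ≤ k := hk
  unfold Spec_raschet_rec raschet_rec raschet_rec_alt
  obtain ⟨n, hn⟩ : ∃ n : Nat, k.toNat = n + 1 :=
    ⟨k.toNat - 1, by omega⟩
  rw [hn, raschetRecAux_eq]
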